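-- pv_equiv track=rewrite | github.com/skief/festo-coding-challenge-2020 | files/primetime.py | check
-- ===== SOURCE A (Python) =====
-- def check(x):
--     while x != 1:
--         if x % 7 == 0:
--             x = x // 7
--         elif x % 11 == 0:
--             x = x // 11
--         elif x % 13 == 0:
--             x = x // 13
--         else:
--             return False
--
--     return True
-- ===== SOURCE B (Python) =====
-- def check(x):
--     bound = abs(x)
--     smooth = []
--     p7 = 1
--     while p7 <= bound:
--         p11 = p7
--         while p11 <= bound:
--             p13 = p11
--             while p13 <= bound:
--                 smooth.append(p13)
--                 p13 *= 13
--             p11 *= 11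
--         p7 *= 7
--     return x in smooth
-- ===== Notes on version B (the rewrite author's own statement) =====
-- stated objective: alternative
-- what changed: B replaces A's repeated trial division by a generate-and-test algorithm: it enumerates every product 7^a*11^b*13^c up to |x| with three nested multiplication loops and returns whether x occurs in that list; no division or modulo is performed at all.
-- outside the precondition, e.g. on check(0): A does not finish within the time limit, B returns False
import Mathlib
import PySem

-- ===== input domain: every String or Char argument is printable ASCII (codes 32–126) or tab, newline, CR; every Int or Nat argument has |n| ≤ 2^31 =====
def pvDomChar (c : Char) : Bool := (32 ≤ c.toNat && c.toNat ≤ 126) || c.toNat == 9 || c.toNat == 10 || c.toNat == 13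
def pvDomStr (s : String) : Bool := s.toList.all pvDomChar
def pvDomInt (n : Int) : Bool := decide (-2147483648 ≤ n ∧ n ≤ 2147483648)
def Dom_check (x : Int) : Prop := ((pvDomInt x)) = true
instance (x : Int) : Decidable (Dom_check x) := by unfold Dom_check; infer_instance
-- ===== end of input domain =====

-- B replaces A's trial-division loop by generate-and-test: it enumerates every product
-- 7^a*11^b*13^c up to |x| and answers by membership; same practical cost, no division at all.

-- termination helper (cited by port A's decreasing_by)
theorem pvNatAbsFdivLt (x p : Int) (hx : ¬ x = 0) (hp : 2 ≤ p)
    (hm : PySem.Int.mod x p = 0) :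
    (PySem.Int.floordiv x p).natAbs < x.natAbs := by
  rw [PySem.Int.floordiv_eq_ediv_of_pos (by omega)]
  obtain ⟨k, rfl⟩ := (PySem.Int.mod_eq_zero_iff_dvd x p).1 hm
  rw [Int.mul_ediv_cancel_left k (by omega)]
  have hk : k ≠ 0 := by rintro rfl; simp at hx
  have := Int.natAbs_mul p k
  have h2 : 2 ≤ p.natAbs := by omega
  have hk' : 0 < k.natAbs := Int.natAbs_pos.2 hk
  nlinarith [this]

-- ===== PORT A =====
def check (x : Int) : Bool :=
  if x = 1 then true
  else if hx : x = 0 then false  -- totality guard: Python A loops forever on 0 (excluded by Pre_check)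
  else if h7 : PySem.Int.mod x 7 = 0 then check (PySem.Int.floordiv x 7)
  else if h11 : PySem.Int.mod x 11 = 0 then check (PySem.Int.floordiv x 11)
  else if h13 : PySem.Int.mod x 13 = 0 then check (PySem.Int.floordiv x 13)
  else false
termination_by x.natAbs
decreasing_by
  · exact pvNatAbsFdivLt x 7 hx (by norm_num) h7
  · exact pvNatAbsFdivLt x 11 hx (by norm_num) h11
  · exact pvNatAbsFdivLt x 13 hx (by norm_num) h13

-- ===== PORT B =====
-- innermost `while p13 <= bound: smooth.append(p13); p13 *= 13` of Source B
-- (the `1 ≤ p` conjunct is a totality guard only: every call keeps p ≥ 1)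
def gen13 (bound p : Int) : List Int :=
  if h : 1 ≤ p ∧ p ≤ bound then p :: gen13 bound (p * 13) else []
termination_by (bound + 1 - p).toNat
decreasing_by obtain ⟨hp1, hp2⟩ := h; omega

-- middle `while p11 <= bound` loop of Source B
def gen11 (bound p : Int) : List Int :=
  if h : 1 ≤ p ∧ p ≤ bound then gen13 bound p ++ gen11 bound (p * 11) else []
termination_by (bound + 1 - p).toNat
decreasing_by obtain ⟨hp1, hp2⟩ := h; omega

-- outer `while p7 <= bound` loop of Source B
def gen7 (bound p : Int) : List Int :=
  if h : 1 ≤ p ∧ p ≤ bound then gen11 bound p ++ gen7 bound (p * 7) else []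
termination_by (bound + 1 - p).toNat
decreasing_by obtain ⟨hp1, hp2⟩ := h; omega

def check_alt (x : Int) : Bool :=
  (gen7 |x| 1).contains x

-- ===== PRECONDITION & SPEC =====
-- Pre_ excludes only x = 0, on which Python A loops forever and returns nothing.
def Pre_check (x : Int) : Prop := x ≠ 0
instance (x : Int) : Decidable (Pre_check x) := by unfold Pre_check; infer_instance
def pvWitness_check : Int := (1001)

def Spec_check (x : Int) (out : Bool) : Prop := out = check_alt x
instance (x : Int) (out : Bool) : Decidable (Spec_check x out) := by unfold Spec_check; infer_instance

-- ===== CLAIM (what is proved, stated in full; the proofs are below) =====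
def Claim_equal_check : Prop := ∀ (x : Int), Dom_check x → Pre_check x → Spec_check x (check x)

-- ===== LEMMAS AND PROOFS =====

-- the common characterisation both programs are proved equal to
def Smooth (x : Int) : Prop := ∃ a b c : ℕ, x = 7 ^ a * 11 ^ b * 13 ^ c

theorem one_le_pow_int (k : Int) (n : ℕ) (h : 1 ≤ k) : (1:Int) ≤ k ^ n :=
  one_le_pow₀ h

-- ---- B side: membership in the generated lists ----

theorem gen13_none (bound p q : Int) (hp : 1 ≤ p) (hb : ¬ p ≤ bound) :
    ¬ ∃ c : ℕ, q = p * 13 ^ c ∧ q ≤ bound := by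
  rintro ⟨c, rfl, hq⟩
  have h1 := one_le_pow_int 13 c (by norm_num)
  nlinarith

theorem mem_gen13 : ∀ (n : ℕ) (bound p q : Int), (bound - p + 1).toNat ≤ n → 1 ≤ p →
    (q ∈ gen13 bound p ↔ ∃ c : ℕ, q = p * 13 ^ c ∧ q ≤ bound) := by
  intro n
  induction n with
  | zero =>
    intro bound p q hle hp
    have hb : ¬ p ≤ bound := by omega
    rw [gen13.eq_def]
    simp only [hp, hb, and_false, dite_false, List.not_mem_nil, false_iff]
    exact gen13_none bound p q hp hb
  | succ n ih =>
    intro bound p q hle hp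
    by_cases hb : p ≤ bound
    · rw [gen13.eq_def]
      simp only [hp, hb, and_self, dite_true, List.mem_cons]
      have hrec := ih bound (p * 13) q (by omega) (by omega)
      constructor
      · rintro (rfl | h)
        · exact ⟨0, by ring, hb⟩
        · obtain ⟨c, rfl, hq⟩ := hrec.1 h
          exact ⟨c + 1, by ring, hq⟩
      · rintro ⟨c, hqe, hq⟩
        cases c with
        | zero => left; rw [hqe]; ring
        | succ c => right; exact hrec.2 ⟨c, by rw [hqe]; ring, hq⟩
    · rw [gen13.eq_def]
      simp only [hp, hb, and_false, dite_false, List.not_mem_nil, false_iff]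
      exact gen13_none bound p q hp hb

theorem gen11_none (bound p q : Int) (hp : 1 ≤ p) (hb : ¬ p ≤ bound) :
    ¬ ∃ b c : ℕ, q = p * 11 ^ b * 13 ^ c ∧ q ≤ bound := by
  rintro ⟨b, c, rfl, hq⟩
  have h1 := one_le_pow_int 11 b (by norm_num)
  have h2 := one_le_pow_int 13 c (by norm_num)
  have h3 : (1:Int) * 1 ≤ 11 ^ b * 13 ^ c := mul_le_mul h1 h2 (by norm_num) (by positivity)
  nlinarith

theorem mem_gen11 : ∀ (n : ℕ) (bound p q : Int), (bound - p + 1).toNat ≤ n → 1 ≤ p →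
    (q ∈ gen11 bound p ↔ ∃ b c : ℕ, q = p * 11 ^ b * 13 ^ c ∧ q ≤ bound) := by
  intro n
  induction n with
  | zero =>
    intro bound p q hle hp
    have hb : ¬ p ≤ bound := by omega
    rw [gen11.eq_def]
    simp only [hp, hb, and_false, dite_false, List.not_mem_nil, false_iff]
    exact gen11_none bound p q hp hb
  | succ n ih =>
    intro bound p q hle hp
    by_cases hb : p ≤ bound
    · rw [gen11.eq_def]
      simp only [hp, hb, and_self, dite_true, List.mem_append]
      have h13 := mem_gen13 (bound - p + 1).toNat bound p q le_rfl hp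
      have hrec := ih bound (p * 11) q (by omega) (by omega)
      constructor
      · rintro (h | h)
        · obtain ⟨c, rfl, hq⟩ := h13.1 h
          exact ⟨0, c, by ring, hq⟩
        · obtain ⟨b, c, rfl, hq⟩ := hrec.1 h
          exact ⟨b + 1, c, by ring, hq⟩
      · rintro ⟨b, c, hqe, hq⟩
        cases b with
        | zero => left; exact h13.2 ⟨c, by rw [hqe]; ring, hq⟩
        | succ b => right; exact hrec.2 ⟨b, c, by rw [hqe]; ring, hq⟩
    · rw [gen11.eq_def]
      simp only [hp, hb, and_false, dite_false, List.not_mem_nil, false_iff]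
      exact gen11_none bound p q hp hb

theorem gen7_none (bound p q : Int) (hp : 1 ≤ p) (hb : ¬ p ≤ bound) :
    ¬ ∃ a b c : ℕ, q = p * 7 ^ a * 11 ^ b * 13 ^ c ∧ q ≤ bound := by
  rintro ⟨a, b, c, rfl, hq⟩
  have h0 := one_le_pow_int 7 a (by norm_num)
  have h1 := one_le_pow_int 11 b (by norm_num)
  have h2 := one_le_pow_int 13 c (by norm_num)
  have h3 : (1:Int) * 1 ≤ 11 ^ b * 13 ^ c := mul_le_mul h1 h2 (by norm_num) (by positivity)
  have h4 : (1:Int) * 1 ≤ 7 ^ a * (11 ^ b * 13 ^ c) := mul_le_mul h0 (by linarith) (by norm_num) (by positivity)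
  have h5 : p * 1 ≤ p * (7 ^ a * (11 ^ b * 13 ^ c)) :=
    mul_le_mul_of_nonneg_left (by linarith) (by omega)
  nlinarith [h5]

theorem mem_gen7 : ∀ (n : ℕ) (bound p q : Int), (bound - p + 1).toNat ≤ n → 1 ≤ p →
    (q ∈ gen7 bound p ↔ ∃ a b c : ℕ, q = p * 7 ^ a * 11 ^ b * 13 ^ c ∧ q ≤ bound) := by
  intro n
  induction n with
  | zero =>
    intro bound p q hle hp
    have hb : ¬ p ≤ bound := by omega
    rw [gen7.eq_def]
    simp only [hp, hb, and_false, dite_false, List.not_mem_nil, false_iff]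
    exact gen7_none bound p q hp hb
  | succ n ih =>
    intro bound p q hle hp
    by_cases hb : p ≤ bound
    · rw [gen7.eq_def]
      simp only [hp, hb, and_self, dite_true, List.mem_append]
      have h11 := mem_gen11 (bound - p + 1).toNat bound p q le_rfl hp
      have hrec := ih bound (p * 7) q (by omega) (by omega)
      constructor
      · rintro (h | h)
        · obtain ⟨b, c, rfl, hq⟩ := h11.1 h
          exact ⟨0, b, c, by ring, hq⟩
        · obtain ⟨a, b, c, rfl, hq⟩ := hrec.1 h
          exact ⟨a + 1, b, c, by ring, hq⟩
      · rintro ⟨a, b, c, hqe, hq⟩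
        cases a with
        | zero => left; exact h11.2 ⟨b, c, by rw [hqe]; ring, hq⟩
        | succ a => right; exact hrec.2 ⟨a, b, c, by rw [hqe]; ring, hq⟩
    · rw [gen7.eq_def]
      simp only [hp, hb, and_false, dite_false, List.not_mem_nil, false_iff]
      exact gen7_none bound p q hp hb

theorem check_alt_true_iff (x : Int) : check_alt x = true ↔ Smooth x := by
  unfold check_alt Smooth
  rw [List.contains_iff_mem,
    mem_gen7 (|x| - 1 + 1).toNat |x| 1 x le_rfl (by norm_num)]
  constructor
  · rintro ⟨a, b, c, hqe, _⟩
    exact ⟨a, b, c, by rw [hqe]; ring⟩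
  · rintro ⟨a, b, c, rfl⟩
    exact ⟨a, b, c, by ring, le_abs_self _⟩

-- ---- A side: trial division computes the same predicate ----

theorem prime_7 : Prime (7:ℤ) := by
  rw [Int.prime_iff_natAbs_prime]; norm_num

theorem prime_11 : Prime (11:ℤ) := by
  rw [Int.prime_iff_natAbs_prime]; norm_num

theorem not_dvd_7_smooth (b c : ℕ) : ¬ (7:ℤ) ∣ 11 ^ b * 13 ^ c := by
  intro h
  rcases prime_7.dvd_mul.1 h with h' | h'
  · have := prime_7.dvd_of_dvd_pow h'; norm_num at this
  · have := prime_7.dvd_of_dvd_pow h'; norm_num at this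

theorem not_dvd_11_13pow (c : ℕ) : ¬ (11:ℤ) ∣ 13 ^ c := by
  intro h
  have := prime_11.dvd_of_dvd_pow h; norm_num at this

theorem div_ne_zero_of_dvd {x p : Int} (hx : x ≠ 0) (h : p ∣ x) : x / p ≠ 0 := by
  obtain ⟨k, rfl⟩ := h
  rcases eq_or_ne p 0 with rfl | hp
  · simpa using hx
  · rw [Int.mul_ediv_cancel_left k hp]
    rintro rfl; simp at hx

theorem smooth_mul_iff (x p : Int) (hdvd : p ∣ x)
    (hform : ∀ a b c : ℕ, x = 7 ^ a * 11 ^ b * 13 ^ c → ∃ y, x = p * y ∧ Smooth y)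
    (hmul : ∀ y : Int, Smooth y → Smooth (p * y)) (hp : p ≠ 0) :
    (Smooth (x / p) ↔ Smooth x) := by
  constructor
  · intro hy
    have hx : x = p * (x / p) := (Int.mul_ediv_cancel' hdvd).symm
    rw [hx]; exact hmul _ hy
  · rintro ⟨a, b, c, hxe⟩
    obtain ⟨y, hxy, hys⟩ := hform a b c hxe
    rw [hxy, Int.mul_ediv_cancel_left _ hp]
    exact hys

theorem check_true_iff : ∀ (n : ℕ) (x : Int), x.natAbs ≤ n → x ≠ 0 →
    (check x = true ↔ Smooth x) := by
  intro n
  induction n with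
  | zero => intro x hle hx; omega
  | succ n ih =>
    intro x hle hx
    by_cases h1 : x = 1
    · subst h1
      have hc : check 1 = true := by rw [check]; simp
      simp only [hc, true_iff]
      exact ⟨0, 0, 0, by norm_num⟩
    · rw [check]
      simp only [h1, if_false, hx, dite_eq_ite, if_false]
      have step : ∀ p : Int, 2 ≤ p → PySem.Int.mod x p = 0 →
          (check (PySem.Int.floordiv x p) = true ↔ Smooth (x / p)) := by
        intro p hp hm
        have hd := (PySem.Int.mod_eq_zero_iff_dvd x p).1 hm
        have hlt := pvNatAbsFdivLt x p hx hp hm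
        rw [PySem.Int.floordiv_eq_ediv_of_pos (show (0:Int) < p by omega)] at hlt ⊢
        exact ih _ (by omega) (div_ne_zero_of_dvd hx hd)
      by_cases h7 : PySem.Int.mod x 7 = 0
      · have hd7 := (PySem.Int.mod_eq_zero_iff_dvd x 7).1 h7
        simp only [h7, if_true]
        rw [step 7 (by norm_num) h7]
        apply smooth_mul_iff x 7 hd7 ?_ ?_ (by norm_num)
        · intro a b c hxe
          cases a with
          | zero =>
            exfalso; apply not_dvd_7_smooth b c
            rw [hxe] at hd7; simpa using hd7
          | succ a =>
            exact ⟨7 ^ a * 11 ^ b * 13 ^ c, by rw [hxe]; ring, ⟨a, b, c, rfl⟩⟩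
        · rintro y ⟨a, b, c, rfl⟩; exact ⟨a + 1, b, c, by ring⟩
      · have hnd7 : ¬ (7:ℤ) ∣ x := fun h => h7 ((PySem.Int.mod_eq_zero_iff_dvd x 7).2 h)
        simp only [h7, if_false]
        by_cases h11 : PySem.Int.mod x 11 = 0
        · have hd11 := (PySem.Int.mod_eq_zero_iff_dvd x 11).1 h11
          simp only [h11, if_true]
          rw [step 11 (by norm_num) h11]
          apply smooth_mul_iff x 11 hd11 ?_ ?_ (by norm_num)
          · intro a b c hxe
            cases a with
            | succ a => exact absurd ⟨7 ^ a * 11 ^ b * 13 ^ c, by rw [hxe]; ring⟩ hnd7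
            | zero =>
              cases b with
              | zero =>
                exfalso; apply not_dvd_11_13pow c
                rw [hxe] at hd11; simpa using hd11
              | succ b =>
                exact ⟨7 ^ 0 * 11 ^ b * 13 ^ c, by rw [hxe]; ring, ⟨0, b, c, rfl⟩⟩
          · rintro y ⟨a, b, c, rfl⟩; exact ⟨a, b + 1, c, by ring⟩
        · have hnd11 : ¬ (11:ℤ) ∣ x := fun h => h11 ((PySem.Int.mod_eq_zero_iff_dvd x 11).2 h)
          simp only [h11, if_false]
          by_cases h13 : PySem.Int.mod x 13 = 0
          · have hd13 := (PySem.Int.mod_eq_zero_iff_dvd x 13).1 h13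
            simp only [h13, if_true]
            rw [step 13 (by norm_num) h13]
            apply smooth_mul_iff x 13 hd13 ?_ ?_ (by norm_num)
            · intro a b c hxe
              cases a with
              | succ a => exact absurd ⟨7 ^ a * 11 ^ b * 13 ^ c, by rw [hxe]; ring⟩ hnd7
              | zero =>
                cases b with
                | succ b => exact absurd ⟨7 ^ 0 * 11 ^ b * 13 ^ c, by rw [hxe]; ring⟩ hnd11
                | zero =>
                  cases c with
                  | zero => exfalso; apply h1; rw [hxe]; norm_num
                  | succ c =>
                    exact ⟨7 ^ 0 * 11 ^ 0 * 13 ^ c, by rw [hxe]; ring, ⟨0, 0, c, rfl⟩⟩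
            · rintro y ⟨a, b, c, rfl⟩; exact ⟨a, b, c + 1, by ring⟩
          · have hnd13 : ¬ (13:ℤ) ∣ x := fun h => h13 ((PySem.Int.mod_eq_zero_iff_dvd x 13).2 h)
            simp only [h13, if_false]
            constructor
            · intro h; simp at h
            rintro ⟨a, b, c, hxe⟩
            exfalso
            cases a with
            | succ a => exact hnd7 ⟨7 ^ a * 11 ^ b * 13 ^ c, by rw [hxe]; ring⟩
            | zero =>
              cases b with
              | succ b => exact hnd11 ⟨7 ^ 0 * 11 ^ b * 13 ^ c, by rw [hxe]; ring⟩
              | zero =>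
                cases c with
                | succ c => exact hnd13 ⟨7 ^ 0 * 11 ^ 0 * 13 ^ c, by rw [hxe]; ring⟩
                | zero => exact h1 (by rw [hxe]; norm_num)

-- ===== VERDICT (by name: the statement is the Claim_ definition above) =====
theorem check_spec : Claim_equal_check := by
  intro x _ hpre
  unfold Spec_check
  have hA := check_true_iff x.natAbs x le_rfl hpre
  have hB := check_alt_true_iff x
  cases hca : check x <;> cases hcb : check_alt x <;> simp_all
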